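-- pv_equiv track=rewrite | github.com/MuhammadAdil006/CompetitiveProgramming | simple/sum.py | solve
-- ===== SOURCE A (Python) =====
-- def solve(a, b):
--     if b == 3:
--         return "NO"
--     if a[0]+a[1] == a[2]:
--         return "YES"
--     else:
--         last = a.pop()
--         a.insert(0, last)
--         b += 1
--         return solve(a, b)
-- ===== SOURCE B (Python) =====
-- def solve(a, b):
--     # Checks the same rotations as A by modular indexing into the original list.
--     # Does not mutate a (A rotates it in place); equivalence is about the return value.
--     L = len(a)
--     for k in range(3 - b):
--         if a[(0 - k) % L] + a[(1 - k) % L] == a[(2 - k) % L]: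
--             return "YES"
--     return "NO"
-- ===== Notes on version B (the rewrite author's own statement) =====
-- stated objective: alternative
-- what changed: A rotates the list in place (pop last, insert at front) and recurses until b reaches 3; B keeps the list untouched and does a single for-loop over range(3-b), testing each rotation by modular indexing into the original list.
-- outside the precondition, e.g. on solve([1, 2, 3], 4): A returns 'YES', B returns 'NO'
import Mathlib
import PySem

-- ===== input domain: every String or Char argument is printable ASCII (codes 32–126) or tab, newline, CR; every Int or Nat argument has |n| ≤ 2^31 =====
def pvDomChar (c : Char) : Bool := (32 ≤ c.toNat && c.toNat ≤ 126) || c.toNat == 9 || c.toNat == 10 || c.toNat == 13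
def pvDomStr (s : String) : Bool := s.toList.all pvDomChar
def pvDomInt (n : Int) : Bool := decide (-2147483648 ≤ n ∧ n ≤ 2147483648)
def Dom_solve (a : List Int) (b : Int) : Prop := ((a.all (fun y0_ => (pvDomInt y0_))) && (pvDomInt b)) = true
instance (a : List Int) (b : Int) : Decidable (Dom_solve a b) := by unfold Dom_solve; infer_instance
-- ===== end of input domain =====

-- B replaces A's recursive rotate-and-retry (which mutates the list in place) by a single
-- read-only scan over range(3-b) with modular indexing into the original list (A mutates its
-- argument, B does not; the equivalence proved here is about the return value only).

-- ===== PORT A =====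
-- A recurses with b increasing until b == 3; under Pre_ (b ≤ 3) the recursion depth is
-- exactly (3-b).toNat, which is the fuel. Fuel exhaustion / IndexError arms are outside Pre_.
def solveFuel : Nat → List Int → Int → String
  | fuel, a, b =>
    if b = 3 then "NO"
    else
      match PySem.List.pyGet? a 0, PySem.List.pyGet? a 1, PySem.List.pyGet? a 2 with
      | some x0, some x1, some x2 =>
        if x0 + x1 = x2 then "YES"
        else
          match PySem.List.pop? a, fuel with   -- last = a.pop()
          | some (last, rest), f + 1 => solveFuel f (last :: rest) (b + 1)  -- a.insert(0, last); recurse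
          | _, _ => "NO"   -- empty-list pop (IndexError) or b > 3 (unbounded recursion): outside Pre_
      | _, _, _ => "NO"    -- a[0]/a[1]/a[2] IndexError: outside Pre_

def solve (a : List Int) (b : Int) : String := solveFuel (3 - b).toNat a b

-- ===== PORT B =====
def altCheck (a : List Int) (L k : Int) : Bool :=
  (PySem.List.pyGet? a (PySem.Int.mod (0 - k) L)).getD 0
    + (PySem.List.pyGet? a (PySem.Int.mod (1 - k) L)).getD 0
    == (PySem.List.pyGet? a (PySem.Int.mod (2 - k) L)).getD 0

def altLoop (a : List Int) (L : Int) : List Int → String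
  | [] => "NO"
  | k :: ks => if altCheck a L k then "YES" else altLoop a L ks

def solve_alt (a : List Int) (b : Int) : String :=
  altLoop a (a.length : Int) (PySem.List.pyRange 0 (3 - b) 1)

-- ===== PRECONDITION & SPEC =====
-- Pre_ excludes b > 3 (there A either recurses past b == 3 forever, i.e. RecursionError, or —
-- when a rotation happens to match — returns "YES" although the attempt counter is already past
-- its budget, an artefact of the recursion counter) and b < 3 with fewer than 3 elements
-- (IndexError on a[0]/a[1]/a[2]).
def Pre_solve (a : List Int) (b : Int) : Prop :=
  b ≤ 3 ∧ (b = 3 ∨ 3 ≤ (a.length : Int))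
instance (a : List Int) (b : Int) : Decidable (Pre_solve a b) := by unfold Pre_solve; infer_instance
def pvWitness_solve : List Int × Int := ([1, 2, 4], 0)
def Spec_solve (a : List Int) (b : Int) (out : String) : Prop := out = solve_alt a b
instance (a : List Int) (b : Int) (out : String) : Decidable (Spec_solve a b out) := by unfold Spec_solve; infer_instance

-- ===== CLAIM (what is proved, stated in full; the proofs are below) =====
def Claim_equal_solve : Prop := ∀ (a : List Int) (b : Int), Dom_solve a b → Pre_solve a b → Spec_solve a b (solve a b)

-- ===== LEMMAS AND PROOFS =====

-- One in-place rotation step of A (pop the last element, re-insert it at the front) is a left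
-- rotation by length-1.
theorem rotStep_eq_rotate {α : Type} (xs : List α) (x : α) :
    x :: xs = (xs ++ [x]).rotate xs.length := by
  rw [List.rotate_eq_drop_append_take (by simp)]
  simp

-- Python's (i - k) % L for 0 < L, rewritten as a Nat-valued index.
theorem mod_bridge (i k L : Nat) (hL : 0 < L) :
    PySem.Int.mod ((i : Int) - (k : Int)) (L : Int) = (((i + (L - 1) * k) % L : Nat) : Int) := by
  rw [PySem.Int.mod_eq_emod_of_pos (by exact_mod_cast hL)]
  have h1 : ((i : Int) - k) % L = ((i : Int) - k + L * k) % L := by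
    rw [Int.add_mul_emod_self_left]
  have h2 : (i : Int) - k + L * k = ((i + (L - 1) * k : Nat) : Int) := by
    push_cast [Nat.cast_sub hL]
    ring
  rw [h1, h2]
  push_cast
  ring_nf

-- altCheck at k reads, in the original list, exactly the first three entries of the k-times
-- rotated list.
theorem altCheck_eq (a : List Int) (k : Nat) (hL : 3 ≤ a.length) :
    altCheck a (a.length : Int) (k : Int)
      = (a[(0 + (a.length - 1) * k) % a.length]'(Nat.mod_lt _ (by omega))
          + a[(1 + (a.length - 1) * k) % a.length]'(Nat.mod_lt _ (by omega))
          == a[(2 + (a.length - 1) * k) % a.length]'(Nat.mod_lt _ (by omega))) := by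
  have hL0 : 0 < a.length := by omega
  unfold altCheck
  rw [show (0 : Int) - (k : Int) = ((0 : Nat) : Int) - (k : Int) by norm_num,
      show (1 : Int) - (k : Int) = ((1 : Nat) : Int) - (k : Int) by norm_num,
      show (2 : Int) - (k : Int) = ((2 : Nat) : Int) - (k : Int) by norm_num,
      mod_bridge 0 k a.length hL0, mod_bridge 1 k a.length hL0, mod_bridge 2 k a.length hL0]
  rw [PySem.List.pyGet?_eq_some_getElem a (by positivity) (by exact_mod_cast Nat.mod_lt _ hL0),
      PySem.List.pyGet?_eq_some_getElem a (by positivity) (by exact_mod_cast Nat.mod_lt _ hL0),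
      PySem.List.pyGet?_eq_some_getElem a (by positivity) (by exact_mod_cast Nat.mod_lt _ hL0)]
  simp only [Int.toNat_natCast, Option.getD_some]

-- Main loop correspondence: with r steps of budget left and k rotations already done,
-- A's recursion on the rotated list equals B's scan over the remaining indices k, k+1, ….
theorem loop_eq (a0 : List Int) (hL : 3 ≤ a0.length) :
    ∀ (r k : Nat) (b : Int), b + r = 3 →
      solveFuel r (a0.rotate ((a0.length - 1) * k)) b
        = altLoop a0 (a0.length : Int) (PySem.List.pyRange (k : Int) ((k : Int) + r) 1) := by
  intro r
  induction r with
  | zero =>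
    intro k b hb
    have hb3 : b = 3 := by omega
    rw [PySem.List.pyRange_one_eq_nil (by omega)]
    simp [solveFuel, altLoop, hb3]
  | succ r ih =>
    intro k b hb
    have hbne : ¬ b = 3 := by omega
    have hlen : (a0.rotate ((a0.length - 1) * k)).length = a0.length := by simp
    have hrot : ∀ i : Nat, i < 3 →
        PySem.List.pyGet? (a0.rotate ((a0.length - 1) * k)) (i : Int)
          = some (a0[(i + (a0.length - 1) * k) % a0.length]'(Nat.mod_lt _ (by omega))) := by
      intro i hi
      rw [PySem.List.pyGet?_eq_some_getElem _ (by positivity)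
            (by rw [hlen]; exact_mod_cast (by omega : i < a0.length))]
      simp only [Int.toNat_natCast]
      rw [List.getElem_rotate]
    have h0 := hrot 0 (by omega)
    have h1 := hrot 1 (by omega)
    have h2 := hrot 2 (by omega)
    rw [show ((0:Nat) : Int) = (0 : Int) by norm_num] at h0
    rw [show ((1:Nat) : Int) = (1 : Int) by norm_num] at h1
    rw [show ((2:Nat) : Int) = (2 : Int) by norm_num] at h2
    rw [PySem.List.pyRange_one_cons (by omega)]
    show solveFuel (r + 1) (a0.rotate ((a0.length - 1) * k)) b
      = if altCheck a0 (a0.length : Int) (k : Int) then "YES"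
        else altLoop a0 (a0.length : Int) (PySem.List.pyRange ((k : Int) + 1) ((k : Int) + (r + 1 : Nat)) 1)
    rw [altCheck_eq a0 k hL]
    unfold solveFuel
    rw [if_neg hbne, h0, h1, h2]
    dsimp only
    by_cases hc :
        a0[(0 + (a0.length - 1) * k) % a0.length]'(Nat.mod_lt _ (by omega))
          + a0[(1 + (a0.length - 1) * k) % a0.length]'(Nat.mod_lt _ (by omega))
          = a0[(2 + (a0.length - 1) * k) % a0.length]'(Nat.mod_lt _ (by omega))
    · rw [if_pos hc, if_pos (by exact beq_iff_eq.mpr hc)]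
    · rw [if_neg hc, if_neg (by simpa using hc)]
      -- the rotated list is nonempty: split it as xs ++ [x] to evaluate pop?
      obtain ⟨xs, x, hsplit⟩ : ∃ xs x, a0.rotate ((a0.length - 1) * k) = xs ++ [x] := by
        rcases List.eq_nil_or_concat (a0.rotate ((a0.length - 1) * k)) with h | ⟨xs, x, h⟩
        · exfalso; have := hlen; rw [h] at this; simp at this; omega
        · exact ⟨xs, x, by simpa using h⟩
      rw [hsplit, PySem.List.pop?_last]
      dsimp only
      have hxs : x :: xs = a0.rotate ((a0.length - 1) * (k + 1)) := by
        rw [rotStep_eq_rotate xs x, ← hsplit, List.rotate_rotate]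
        have hxlen : xs.length = a0.length - 1 := by
          have := hlen; rw [hsplit] at this; simp at this; omega
        rw [hxlen, ← Nat.mul_succ]
      rw [hxs]
      have := ih (k + 1) (b + 1) (by omega)
      rw [show (((k+1 : Nat)) : Int) = (k : Int) + 1 by push_cast; ring] at this
      rw [this]
      congr 1
      push_cast
      ring_nf

-- ===== VERDICT (by name: the statement is the Claim_ definition above) =====
theorem solve_spec : Claim_equal_solve := by
  intro a b _hdom hpre
  obtain ⟨hb, hcase⟩ := hpre
  unfold Spec_solve solve solve_alt
  rcases hcase with hb3 | hlen
  · subst hb3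
    rw [PySem.List.pyRange_one_eq_nil (by omega)]
    simp [solveFuel, altLoop]
  · have hL : 3 ≤ a.length := by exact_mod_cast hlen
    have hfuel : ((3 - b).toNat : Int) = 3 - b := by omega
    have := loop_eq a hL (3 - b).toNat 0 b (by omega)
    rw [show (a.length - 1) * 0 = 0 by ring, List.rotate_zero] at this
    rw [show ((0:Nat) : Int) = (0 : Int) by norm_num] at this
    rw [this, zero_add, hfuel]
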